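-- pv_equiv track=rewrite | github.com/juye-ops/algorithm | Baekjoon/5430.py | solution
-- ===== SOURCE A (Python) =====
-- def solution(CMD, arr):
--     r_state = 1
--     for i in CMD:
--         if i == 'R':
--             r_state *= -1
--
--         elif i == 'D':
--             if not arr:
--                 return 'error'
--
--             if r_state == 1:
--                 arr.pop(0)
--             elif r_state == -1:
--                 arr.pop()
--
--     return str(arr[::r_state]).replace(" ", "")
-- ===== SOURCE B (Python) =====
-- def solution(CMD, arr):
--     # Counter-based alternative: track direction and front/back deletion counts instead of popping.
--     # Note: unlike A, this does not mutate arr; equivalence is about the return value.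
--     d = 1
--     f = 0
--     b = 0
--     n = len(arr)
--     for c in CMD:
--         if c == 'R':
--             d = -d
--         elif c == 'D':
--             if f + b == n:
--                 return 'error'
--             if d == 1:
--                 f += 1
--             else:
--                 b += 1
--     rest = arr[f:n - b]
--     return str(rest[::d]).replace(" ", "")
-- ===== Notes on version B (the rewrite author's own statement) =====
-- stated objective: alternative
-- what changed: Instead of popping elements from the list for every D command, B scans CMD once maintaining a direction flag and front/back deletion counters, then takes the surviving middle segment with a single slice (B does not mutate arr; return values are identical).
import Mathlib
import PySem

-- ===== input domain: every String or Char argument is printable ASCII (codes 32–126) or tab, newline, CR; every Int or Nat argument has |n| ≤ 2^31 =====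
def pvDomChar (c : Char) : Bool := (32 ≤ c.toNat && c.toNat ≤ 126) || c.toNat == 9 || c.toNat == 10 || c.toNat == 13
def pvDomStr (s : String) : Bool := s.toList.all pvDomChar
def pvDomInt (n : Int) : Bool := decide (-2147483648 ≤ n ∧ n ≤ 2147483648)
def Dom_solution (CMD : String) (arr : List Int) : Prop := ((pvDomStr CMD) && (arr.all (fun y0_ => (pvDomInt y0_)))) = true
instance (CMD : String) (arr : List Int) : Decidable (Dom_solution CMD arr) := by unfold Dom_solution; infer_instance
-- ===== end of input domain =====

-- B replaces A's repeated front/back pops by one scan keeping a direction flag and two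
-- deletion counters, then one slice (objective: alternative algorithm, same measured cost);
-- A mutates arr in place, B does not — the equivalence proved is about the return value.

-- ===== PORT A =====
-- str(xs).replace(" ", "")  for a list of ints
def pvFmt (l : List Int) : String :=
  PySem.Str.replace ("[" ++ PySem.Str.join ", " (l.map PySem.Int.toStr) ++ "]") " " ""

-- the for-loop of A: threads (r_state, arr); none = the 'return "error"' path
def solLoopA : List Char → Int → List Int → Option (List Int × Int)
  | [], r, arr => some (arr, r)
  | c :: cs, r, arr =>
    if c = 'R' then solLoopA cs (r * -1) arr
    else if c = 'D' then
      if arr = [] then none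
      else if r = 1 then solLoopA cs r arr.tail
      else if r = -1 then solLoopA cs r arr.dropLast
      else solLoopA cs r arr
    else solLoopA cs r arr

def solution (CMD : String) (arr : List Int) : String :=
  match solLoopA CMD.toList 1 arr with
  | none => "error"
  | some (arr', r) => pvFmt ((PySem.List.slice? arr' none none r).getD [])

-- ===== PORT B =====
-- the for-loop of B: direction d, front/back counters f b against length n
def altScan : List Char → Int → Nat → Nat → Nat → Option (Int × Nat × Nat)
  | [], d, f, b, _ => some (d, f, b)
  | c :: cs, d, f, b, n =>
    if c = 'R' then altScan cs (-d) f b n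
    else if c = 'D' then
      if f + b = n then none
      else if d = 1 then altScan cs d (f + 1) b n
      else altScan cs d f (b + 1) n
    else altScan cs d f b n

def solution_alt (CMD : String) (arr : List Int) : String :=
  match altScan CMD.toList 1 0 0 arr.length with
  | none => "error"
  | some (d, f, b) =>
    let rest := PySem.List.slice arr (some (f : Int)) (some ((arr.length : Int) - (b : Int)))
    pvFmt ((PySem.List.slice? rest none none d).getD [])

-- ===== PRECONDITION & SPEC =====
def Spec_solution (CMD : String) (arr : List Int) (out : String) : Prop := out = solution_alt CMD arr
instance (CMD : String) (arr : List Int) (out : String) : Decidable (Spec_solution CMD arr out) := by unfold Spec_solution; infer_instance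

-- ===== CLAIM (what is proved, stated in full; the proofs are below) =====
def Claim_equal_solution : Prop := ∀ (CMD : String) (arr : List Int), Dom_solution CMD arr → Spec_solution CMD arr (solution CMD arr)

-- ===== LEMMAS AND PROOFS =====

-- the surviving middle segment of l after f front- and b back-deletions
def survivors (l : List Int) (f b : Nat) : List Int := (l.drop f).take (l.length - b - f)

theorem tail_take_aux {a : Type} (n : Nat) (l : List a) : (l.take n).tail = l.tail.take (n - 1) := by
  cases l <;> cases n <;> simp

theorem altScan_bound : ∀ (cs : List Char) (d : Int) (f b n : Nat) (d' : Int) (f' b' : Nat),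
    altScan cs d f b n = some (d', f', b') → f + b ≤ n → f' + b' ≤ n := by
  intro cs
  induction cs with
  | nil =>
    intro d f b n d' f' b' h hle
    simp [altScan] at h
    omega
  | cons c cs ih =>
    intro d f b n d' f' b' h hle
    simp only [altScan] at h
    split_ifs at h with h1 h2 h3 h4
    · exact ih _ _ _ _ _ _ _ h hle
    · exact ih _ _ _ _ _ _ _ h (by omega)
    · exact ih _ _ _ _ _ _ _ h (by omega)
    · exact ih _ _ _ _ _ _ _ h hle

theorem loop_eq : ∀ (cs : List Char) (d : Int) (f b : Nat) (l : List Int),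
    (d = 1 ∨ d = -1) → f + b ≤ l.length →
    solLoopA cs d (survivors l f b)
      = (altScan cs d f b l.length).map
          (fun t => (survivors l t.2.1 t.2.2, t.1)) := by
  intro cs
  induction cs with
  | nil => intro d f b l _ hle; simp [solLoopA, altScan]
  | cons c cs ih =>
    intro d f b l hpm hle
    have hlen : (survivors l f b).length = l.length - b - f := by
      simp [survivors]; omega
    by_cases hR : c = 'R'
    · simp only [solLoopA, altScan, hR]
      rw [show d * -1 = -d by ring]
      exact ih _ _ _ _ (by omega) hle
    · by_cases hD : c = 'D'
      · simp only [solLoopA, altScan, hD, Char.reduceEq, reduceIte]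
        by_cases hemp : f + b = l.length
        · have : survivors l f b = [] := by
            rw [← List.length_eq_zero_iff, hlen]; omega
          simp [this, hemp]
        · have hne : survivors l f b ≠ [] := by
            rw [← List.length_pos_iff_ne_nil, hlen]; omega
          rw [if_neg hne, if_neg hemp]
          by_cases hd1 : d = 1
          · rw [if_pos hd1, if_pos hd1]
            have htail : (survivors l f b).tail = survivors l (f + 1) b := by
              unfold survivors
              rw [tail_take_aux, List.tail_drop,
                show l.length - b - f - 1 = l.length - b - (f + 1) from by omega]
            rw [htail]
            exact ih _ _ _ _ hpm (by omega)
          · have hdm : d = -1 := by omega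
            rw [if_neg hd1, if_neg hd1, if_pos hdm]
            have hdl : (survivors l f b).dropLast = survivors l f (b + 1) := by
                rw [List.dropLast_eq_take, hlen]
                unfold survivors
                rw [List.take_take,
                  show min (l.length - b - f - 1) (l.length - b - f) = l.length - (b + 1) - f from by omega]
            rw [hdl]
            exact ih _ _ _ _ hpm (by omega)
      · simp only [solLoopA, altScan, if_neg hR, if_neg hD]
        exact ih _ _ _ _ hpm hle

theorem slice_eq_survivors (l : List Int) (f b : Nat) (h : f + b ≤ l.length) :
    PySem.List.slice l (some (f : Int)) (some ((l.length : Int) - (b : Int))) = survivors l f b := by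
  have hc : ((l.length : Int) - (b : Int)) = ((l.length - b : Nat) : Int) := by omega
  rw [hc, PySem.List.slice_natCast]
  rfl

-- ===== VERDICT (by name: the statement is the Claim_ definition above) =====
theorem solution_spec : Claim_equal_solution := by
  intro CMD arr _
  unfold Spec_solution solution solution_alt
  have h0 : survivors arr 0 0 = arr := by simp [survivors]
  have := loop_eq CMD.toList 1 0 0 arr (Or.inl rfl) (by omega)
  rw [h0] at this
  rw [this]
  cases hscan : altScan CMD.toList 1 0 0 arr.length with
  | none => simp
  | some t =>
    obtain ⟨d, f, b⟩ := t
    have hb : f + b ≤ arr.length := altScan_bound _ _ _ _ _ _ _ _ hscan (by omega)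
    simp only [Option.map_some]
    rw [slice_eq_survivors arr f b hb]
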